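-- pv_equiv track=rewrite | github.com/TristanSeabrook/advent_of_code_2023 | 01.py | replaceStringsWithDigits
-- ===== SOURCE A (Python) =====
-- def replaceStringsWithDigits(inputString, keyList, inputDict, iteration = 0):
--     endOfList = len(keyList)
--     if iteration == endOfList:
--         return inputString
--     else:
--         currentKey = keyList[iteration]
--         nextIteration = iteration + 1
--         updatedString = inputString.replace(currentKey, inputDict[currentKey])
--         return replaceStringsWithDigits(updatedString, keyList, inputDict, nextIteration)
-- ===== SOURCE B (Python) =====
-- def replaceStringsWithDigits(inputString, keyList, inputDict, iteration=0):
--     for i in range(iteration, len(keyList)):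
--         key = keyList[i]
--         inputString = inputString.replace(key, inputDict[key])
--     return inputString
-- ===== Notes on version B (the rewrite author's own statement) =====
-- stated objective: simpler
-- what changed: Replaced A's tail recursion (one call per key, threading the iteration counter) by a single iterative for-loop over range(iteration, len(keyList)) that reassigns the string in place.
import Mathlib
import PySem

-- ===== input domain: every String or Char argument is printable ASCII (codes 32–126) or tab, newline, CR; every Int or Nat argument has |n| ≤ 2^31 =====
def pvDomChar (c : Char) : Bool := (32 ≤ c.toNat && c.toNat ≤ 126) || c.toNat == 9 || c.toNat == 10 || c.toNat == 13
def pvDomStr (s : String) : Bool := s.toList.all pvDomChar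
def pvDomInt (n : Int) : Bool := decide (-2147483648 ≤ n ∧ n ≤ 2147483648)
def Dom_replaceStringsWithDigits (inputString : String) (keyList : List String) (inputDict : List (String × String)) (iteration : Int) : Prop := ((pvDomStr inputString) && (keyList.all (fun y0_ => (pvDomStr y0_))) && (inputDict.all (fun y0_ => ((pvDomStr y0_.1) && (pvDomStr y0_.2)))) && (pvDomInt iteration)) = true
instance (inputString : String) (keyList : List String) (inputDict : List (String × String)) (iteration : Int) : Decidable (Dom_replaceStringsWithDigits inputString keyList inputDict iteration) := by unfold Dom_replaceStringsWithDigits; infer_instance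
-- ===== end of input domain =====

-- B replaces A's tail recursion by a single iterative for-loop over range(iteration, len(keyList)) — simpler, no recursion depth.

-- ===== PORT A =====
-- Literal transliteration of A's recursion; where Python raises (IndexError on keyList[iteration],
-- KeyError on inputDict[currentKey]) the port returns the current string — those inputs are outside Pre_.
def replaceStringsWithDigits (inputString : String) (keyList : List String) (inputDict : List (String × String)) (iteration : Int) : String :=
  -- endOfList = len(keyList)
  if iteration = (keyList.length : Int) then inputString
  else
    match h : PySem.List.pyGet? keyList iteration with
    | none => inputString   -- Python: IndexError (excluded by Pre_)
    | some currentKey =>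
      match inputDict.find? (fun p => p.1 == currentKey) with
      | none => inputString -- Python: KeyError (excluded by Pre_)
      | some p =>
        replaceStringsWithDigits (PySem.Str.replace inputString currentKey p.2) keyList inputDict (iteration + 1)
termination_by ((keyList.length : Int) - iteration).toNat
decreasing_by
  have hin : PySem.Raise.InRange keyList.length iteration := by
    by_contra hc
    rw [← PySem.List.pyGet?_eq_none_iff] at hc
    rw [hc] at h
    simp at h
  rcases hin with ⟨hl, hr⟩
  omega

-- ===== PORT B =====
-- Transliteration of Source B: a fold over range(iteration, len(keyList)), reassigning the string.
def replaceStringsWithDigits_alt (inputString : String) (keyList : List String) (inputDict : List (String × String)) (iteration : Int) : String :=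
  (PySem.List.pyRange iteration (keyList.length : Int) 1).foldl
    (fun acc i =>
      let key := PySem.List.pyGetD keyList i ""
      match inputDict.find? (fun p => p.1 == key) with
      | none => acc       -- Python: KeyError (excluded by Pre_)
      | some p => PySem.Str.replace acc key p.2)
    inputString

-- ===== PRECONDITION & SPEC =====
-- Pre_ is exactly where Python A returns normally: iteration must be a valid (possibly negatively
-- wrapped) resume index, i.e. -len ≤ iteration ≤ len, and every key A will look up must be in the
-- dict (for negative iteration A wraps around and processes every key, so all keys are needed).
def Pre_replaceStringsWithDigits (inputString : String) (keyList : List String) (inputDict : List (String × String)) (iteration : Int) : Prop :=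
  -(keyList.length : Int) ≤ iteration ∧ iteration ≤ (keyList.length : Int) ∧
  ∀ k ∈ (if 0 ≤ iteration then keyList.drop iteration.toNat else keyList),
    (inputDict.find? (fun p => p.1 == k)).isSome = true
instance (inputString : String) (keyList : List String) (inputDict : List (String × String)) (iteration : Int) : Decidable (Pre_replaceStringsWithDigits inputString keyList inputDict iteration) := by unfold Pre_replaceStringsWithDigits; infer_instance

def pvWitness_replaceStringsWithDigits : String × List String × (List (String × String)) × Int :=
  ("one2two", ["one", "two"], [("one", "1"), ("two", "2")], 0)

def Spec_replaceStringsWithDigits (inputString : String) (keyList : List String) (inputDict : List (String × String)) (iteration : Int) (out : String) : Prop := out = replaceStringsWithDigits_alt inputString keyList inputDict iteration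
instance (inputString : String) (keyList : List String) (inputDict : List (String × String)) (iteration : Int) (out : String) : Decidable (Spec_replaceStringsWithDigits inputString keyList inputDict iteration out) := by unfold Spec_replaceStringsWithDigits; infer_instance

-- ===== CLAIM (what is proved, stated in full; the proofs are below) =====
def Claim_equal_replaceStringsWithDigits : Prop := ∀ (inputString : String) (keyList : List String) (inputDict : List (String × String)) (iteration : Int), Dom_replaceStringsWithDigits inputString keyList inputDict iteration → Pre_replaceStringsWithDigits inputString keyList inputDict iteration → Spec_replaceStringsWithDigits inputString keyList inputDict iteration (replaceStringsWithDigits inputString keyList inputDict iteration)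
-- ===== LEMMAS AND PROOFS =====

-- Core invariant: from any valid resume index, A's recursion equals B's fold over the remaining range.
theorem pv_main (keyList : List String) (inputDict : List (String × String)) :
    ∀ (n : Nat) (s : String) (it : Int),
      (((keyList.length : Int) - it).toNat = n) →
      -(keyList.length : Int) ≤ it → it ≤ (keyList.length : Int) →
      (∀ k ∈ (if 0 ≤ it then keyList.drop it.toNat else keyList),
        (inputDict.find? (fun p => p.1 == k)).isSome = true) →
      replaceStringsWithDigits s keyList inputDict it
        = replaceStringsWithDigits_alt s keyList inputDict it := by
  intro n
  induction n with
  | zero =>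
    intro s it hn h1 h2 h3
    have hend : it = (keyList.length : Int) := by omega
    rw [replaceStringsWithDigits, replaceStringsWithDigits_alt]
    rw [PySem.List.pyRange_one_eq_nil (le_of_eq hend.symm)]
    simp [hend]
  | succ m ih =>
    intro s it hn h1 h2 h3
    have hlt : it < (keyList.length : Int) := by omega
    obtain ⟨k, hk⟩ : ∃ k, PySem.List.pyGet? keyList it = some k := by
      cases hg : PySem.List.pyGet? keyList it with
      | none =>
        rw [PySem.List.pyGet?_eq_none_iff] at hg
        exact absurd ⟨h1, hlt⟩ hg
      | some k => exact ⟨k, rfl⟩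
    have hkpre : k ∈ (if 0 ≤ it then keyList.drop it.toNat else keyList) := by
      by_cases hpos : 0 ≤ it
      · rw [if_pos hpos]
        rw [PySem.List.pyGet?_of_nonneg _ hpos] at hk
        have hlen : it.toNat < keyList.length := by omega
        have : keyList[it.toNat] = k := by
          have := hk
          rw [List.getElem?_eq_getElem hlen] at this
          exact Option.some.inj this
        subst this
        have h0 : 0 < (keyList.drop it.toNat).length := by
          rw [List.length_drop]; omega
        have := List.getElem_mem h0
        rw [List.getElem_drop] at this
        simpa using this
      · rw [if_neg hpos]
        exact PySem.List.mem_of_pyGet?_eq_some _ hk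
    have hfind : (inputDict.find? (fun p => p.1 == k)).isSome = true := h3 k hkpre
    obtain ⟨p, hp⟩ := Option.isSome_iff_exists.mp hfind
    -- unfold B one step
    conv_rhs => rw [replaceStringsWithDigits_alt, PySem.List.pyRange_one_cons hlt]
    -- unfold A one step
    conv_lhs => rw [replaceStringsWithDigits]
    rw [if_neg (ne_of_lt hlt)]
    split
    case h_1 heq => rw [hk] at heq; simp at heq
    case h_2 k0 heq =>
      rw [hk] at heq
      cases Option.some.inj heq
      have hkey : PySem.List.pyGetD keyList it "" = k := by
        simp [PySem.List.pyGetD, hk]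
      simp only [hp, List.foldl_cons, hkey]
      have hkeys : ∀ k' ∈ (if 0 ≤ it + 1 then keyList.drop (it + 1).toNat else keyList),
          (inputDict.find? (fun p => p.1 == k')).isSome = true := by
        intro k' hk'
        apply h3
        by_cases hpos : 0 ≤ it
        · rw [if_pos hpos]
          rw [if_pos (by omega)] at hk'
          have he : (it + 1).toNat = it.toNat + 1 := by omega
          rw [he] at hk'
          have hd : keyList.drop (it.toNat + 1) = (keyList.drop it.toNat).drop 1 := by
            rw [List.drop_drop]
          rw [hd] at hk'
          exact List.drop_subset _ _ hk'
        · rw [if_neg hpos]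
          by_cases hpos1 : 0 ≤ it + 1
          · rw [if_pos hpos1] at hk'
            exact List.drop_subset _ _ hk'
          · rwa [if_neg hpos1] at hk'
      rw [ih (PySem.Str.replace s k p.2) (it + 1) (by omega) (by omega) (by omega) hkeys]
      rfl

-- ===== VERDICT (by name: the statement is the Claim_ definition above) =====
theorem replaceStringsWithDigits_spec : Claim_equal_replaceStringsWithDigits := by
  intro s ks d it _ hpre
  rcases hpre with ⟨h1, h2, h3⟩
  exact pv_main ks d _ s it rfl h1 h2 h3
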